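-- pv_equiv track=rewrite | github.com/ShubhamKumaR-96/DSA_Leetcode | prefixSum2/StringPairs.py | cntPairs
-- ===== SOURCE A (Python) =====
-- def cntPairs(S):
--     n=len(S)
--     cnt=0
--     ans=0
--
--     for i in range(n-1,-1,-1):
--         if S[i]=='g':
--             cnt+=1
--         if S[i]=='a':
--             ans+=cnt
--     return ans
-- ===== SOURCE B (Python) =====
-- def cntPairs(S):
--     prefix = []
--     run = 0
--     for ch in S:
--         prefix.append(run)
--         if ch == 'a':
--             run += 1
--     ans = 0
--     for ch, p in zip(S, prefix):
--         if ch == 'g':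
--             ans += p
--     return ans
-- ===== Notes on version B (the rewrite author's own statement) =====
-- stated objective: alternative
-- what changed: A makes one backward index scan with a running 'g' counter; B materializes a prefix table of 'a'-counts in a forward pass and then sums the table entries at the 'g' positions in a second pass.
import Mathlib
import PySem

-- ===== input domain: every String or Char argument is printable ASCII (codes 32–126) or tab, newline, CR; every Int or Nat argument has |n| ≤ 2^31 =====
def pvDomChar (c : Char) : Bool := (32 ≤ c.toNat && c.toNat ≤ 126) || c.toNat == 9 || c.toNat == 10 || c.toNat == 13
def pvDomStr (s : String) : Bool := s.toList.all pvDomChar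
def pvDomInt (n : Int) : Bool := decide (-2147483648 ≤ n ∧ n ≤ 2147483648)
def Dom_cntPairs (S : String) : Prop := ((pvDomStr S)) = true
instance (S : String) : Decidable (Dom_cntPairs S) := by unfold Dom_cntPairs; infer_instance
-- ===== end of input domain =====

-- B replaces A's single backward index scan (running 'g' counter) by a prefix table of
-- 'a'-counts built forward plus a second pass over the 'g' positions (alternative decomposition, same cost).

-- ===== PORT A =====
-- A: for i in range(n-1,-1,-1): if S[i]=='g': cnt+=1 ; if S[i]=='a': ans+=cnt
def cntPairs (S : String) : Int :=
  let n : Int := PySem.Str.len S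
  ((PySem.List.pyRange (n - 1) (-1) (-1)).foldl
    (fun (st : Int × Int) i =>
      let cnt := if PySem.List.pyGet? S.toList i = some 'g' then st.1 + 1 else st.1
      (cnt, if PySem.List.pyGet? S.toList i = some 'a' then st.2 + cnt else st.2))
    (0, 0)).2

-- ===== PORT B =====
-- prefix table: prefix[i] = number of 'a' in S[:i], built by a forward pass with a running count
def cntPairsPrefix : List Char → Int → List Int
  | [], _ => []
  | c :: t, run => run :: cntPairsPrefix t (if c = 'a' then run + 1 else run)

def cntPairs_alt (S : String) : Int :=
  let cs := S.toList
  let pre := cntPairsPrefix cs 0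
  (cs.zip pre).foldl (fun ans p => if p.1 = 'g' then ans + p.2 else ans) 0

-- ===== PRECONDITION & SPEC =====
def Spec_cntPairs (S : String) (out : Int) : Prop := out = cntPairs_alt S
instance (S : String) (out : Int) : Decidable (Spec_cntPairs S out) := by unfold Spec_cntPairs; infer_instance

-- ===== CLAIM (what is proved, stated in full; the proofs are below) =====
def Claim_equal_cntPairs : Prop := ∀ (S : String), Dom_cntPairs S → Spec_cntPairs S (cntPairs S)

-- ===== LEMMAS AND PROOFS =====

-- the step of A's loop, as a function of the character
def stepA (c : Char) (st : Int × Int) : Int × Int :=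
  let cnt := if c = 'g' then st.1 + 1 else st.1
  (cnt, if c = 'a' then st.2 + cnt else st.2)

-- A's countdown index loop is a right fold over the characters
lemma loopA_eq (cs : List Char) (st : Int × Int) :
    ((PySem.List.pyRange ((cs.length : Int) - 1) (-1) (-1)).foldl
      (fun (st : Int × Int) i =>
        let cnt := if PySem.List.pyGet? cs i = some 'g' then st.1 + 1 else st.1
        (cnt, if PySem.List.pyGet? cs i = some 'a' then st.2 + cnt else st.2)) st)
    = cs.foldr stepA st := by
  induction cs using List.reverseRecOn generalizing st with
  | nil => simp [PySem.List.pyRange_neg_one_eq_nil]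
  | append_singleton es c ih =>
    have hget : PySem.List.pyGet? (es ++ [c]) (es.length : Int) = some c := by
      rw [PySem.List.pyGet?_natCast]; simp
    rw [show ((es ++ [c]).length : Int) - 1 = (es.length : Int) by simp,
      PySem.List.pyRange_neg_one_cons (by omega : (-1 : Int) < (es.length : Int))]
    simp only [List.foldl_cons, hget]
    rw [List.foldr_append, List.foldr_cons, List.foldr_nil, ← ih (stepA c st)]
    have hinit : ((if (some c : Option Char) = some 'g' then st.1 + 1 else st.1,
        if (some c : Option Char) = some 'a' then
          st.2 + (if (some c : Option Char) = some 'g' then st.1 + 1 else st.1) else st.2) : Int × Int)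
        = stepA c st := by
      simp [stepA]
    rw [hinit]
    apply PySem.List.foldl_congr_mem
    intro acc x hx
    rw [PySem.List.mem_pyRange_neg_one] at hx
    have h0 : (0 : Int) ≤ x := by omega
    have hlt : x.toNat < es.length := by omega
    rw [PySem.List.pyGet?_of_nonneg _ h0, PySem.List.pyGet?_of_nonneg _ h0,
      List.getElem?_append_left hlt]

-- B's zip/prefix fold, related to A's right fold, with generalized running count and accumulator
lemma loopB_eq (cs : List Char) (run ans : Int) :
    ((cs.zip (cntPairsPrefix cs run)).foldl
      (fun ans p => if p.1 = 'g' then ans + p.2 else ans) ans)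
    = ans + run * (cs.foldr stepA (0, 0)).1 + (cs.foldr stepA (0, 0)).2 := by
  induction cs generalizing run ans with
  | nil => simp [cntPairsPrefix]
  | cons c t ih =>
    rw [cntPairsPrefix, List.zip_cons_cons, List.foldl_cons,
      ih (if c = 'a' then run + 1 else run) (if c = 'g' then ans + run else ans)]
    simp only [List.foldr_cons, stepA]
    by_cases hg : c = 'g' <;> by_cases ha : c = 'a' <;>
      simp_all <;> ring

-- ===== VERDICT (by name: the statement is the Claim_ definition above) =====
theorem cntPairs_spec : Claim_equal_cntPairs := by
  intro S _
  unfold Spec_cntPairs cntPairs cntPairs_alt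
  simp only [PySem.Str.len_eq]
  rw [loopA_eq, loopB_eq]
  ring
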